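-- pv_equiv track=rewrite | github.com/amitsing8/cs224ndef | data_augment.py | getTuples
-- ===== SOURCE A (Python) =====
-- def getTuples(answerIndicesList, ctxlen):
--     ctx_tuples = []
--     ans_tuples = []
--     ctxtuplenow = True
--     startIdx = 0
--     previdx = None
--     for idx in answerIndicesList:
--         if idx == 0:
--             ctxtuplenow = False
--             previdx = idx
--             continue
--         if previdx is not None and idx == previdx+1:
--             previdx = idx
--             continue
--         if ctxtuplenow:
--             ctx_tuples.append((startIdx, idx))
--             startIdx = idx
--             previdx = idx
--             ctxtuplenow = False
--         else:
--             ans_tuples.append((startIdx, previdx))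
--             ctx_tuples.append((previdx, idx))
--             startIdx = idx
--             previdx = idx
--     if previdx is None:
--         ctx_tuples.append((0, ctxlen))
--     else:
--         if (previdx < ctxlen-1):
--             ans_tuples.append((startIdx, previdx))
--             ctx_tuples.append((previdx, ctxlen))
--         else:
--             ans_tuples.append((startIdx, previdx))
--     return ctx_tuples, ans_tuples
-- ===== SOURCE B (Python) =====
-- def getTuples(answerIndicesList, ctxlen):
--     # Staged, declarative reconstruction: first collect the "gap" pairs
--     # (end of one maximal run, start of the next) by indexing, then assemble
--     # both outputs wholesale from that list with comprehensions and zip.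
--     xs = answerIndicesList
--     if not xs:
--         return [(0, ctxlen)], []
--     n = len(xs)
--     gaps = [(xs[i - 1], xs[i]) for i in range(1, n)
--             if xs[i] != 0 and xs[i] != xs[i - 1] + 1]
--     start0 = xs[0] if xs[0] != 0 else 0
--     starts = [start0] + [b for (_, b) in gaps]
--     ends = [a for (a, _) in gaps] + [xs[-1]]
--     ans_tuples = list(zip(starts, ends))
--     ctx_tuples = ([(0, xs[0])] if xs[0] != 0 else []) \
--         + gaps \
--         + ([(xs[-1], ctxlen)] if xs[-1] < ctxlen - 1 else [])
--     return ctx_tuples, ans_tuples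
-- ===== Notes on version B (the rewrite author's own statement) =====
-- stated objective: alternative
-- what changed: A's single-pass five-variable state machine (ctxtuplenow flag, Optional previdx, startIdx mutated in branches) is replaced by a staged declarative construction: one comprehension collects the gap pairs between maximal runs, and both output lists are then assembled wholesale from that gap list via comprehensions and a zip of run starts with run ends, with no mutable loop state at all.
import Mathlib
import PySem

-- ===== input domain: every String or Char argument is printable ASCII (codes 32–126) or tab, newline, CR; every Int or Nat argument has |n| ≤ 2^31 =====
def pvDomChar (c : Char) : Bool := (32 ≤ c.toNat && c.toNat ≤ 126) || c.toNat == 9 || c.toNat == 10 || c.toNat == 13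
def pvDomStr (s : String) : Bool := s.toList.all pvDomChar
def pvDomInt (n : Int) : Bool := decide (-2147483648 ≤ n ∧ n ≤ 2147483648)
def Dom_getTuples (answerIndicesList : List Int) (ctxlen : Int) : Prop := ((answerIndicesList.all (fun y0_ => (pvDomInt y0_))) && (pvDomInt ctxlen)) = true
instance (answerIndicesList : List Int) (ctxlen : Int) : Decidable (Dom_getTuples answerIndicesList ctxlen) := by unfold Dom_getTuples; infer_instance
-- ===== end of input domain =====

-- B replaces A's single-pass five-variable state machine by a staged declarative build:
-- collect the inter-run gap pairs with one comprehension, then assemble both outputs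
-- from that gap list via comprehensions and zip (objective: alternative decomposition).


-- ===== PORT A =====
-- loop body of A: state = (ctx_tuples, ans_tuples, ctxtuplenow, startIdx, previdx)
def getTuplesStepA (st : (List (Int × Int)) × (List (Int × Int)) × Bool × Int × Option Int)
    (idx : Int) : (List (Int × Int)) × (List (Int × Int)) × Bool × Int × Option Int :=
  let (ctx, ans, c, s, p) := st
  if idx = 0 then (ctx, ans, false, s, some idx)
  else
    match p with
    | some pv =>
      if idx = pv + 1 then (ctx, ans, c, s, some idx)
      else if c then (ctx ++ [(s, idx)], ans, false, idx, some idx)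
      else (ctx ++ [(pv, idx)], ans ++ [(s, pv)], false, idx, some idx)
    | none =>
      -- 'previdx is not None and …' is false; fall through to the ctxtuplenow test.
      if c then (ctx ++ [(s, idx)], ans, false, idx, some idx)
      -- the branch below (previdx = none, ctxtuplenow = false) is unreachable in A
      -- (Python would append (startIdx, None)); any value is fine here.
      else (ctx, ans, false, idx, some idx)

def getTuples (answerIndicesList : List Int) (ctxlen : Int) : (List (Int × Int)) × (List (Int × Int)) :=
  let st := answerIndicesList.foldl getTuplesStepA ([], [], true, 0, none)
  match st with
  | (ctx, ans, _, _, none) => (ctx ++ [(0, ctxlen)], ans)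
  | (ctx, ans, _, s, some pv) =>
    if pv < ctxlen - 1 then (ctx ++ [(pv, ctxlen)], ans ++ [(s, pv)])
    else (ctx, ans ++ [(s, pv)])

-- ===== PORT B =====
def getTuples_alt (answerIndicesList : List Int) (ctxlen : Int) : (List (Int × Int)) × (List (Int × Int)) :=
  match answerIndicesList with
  | [] => ([(0, ctxlen)], [])
  | first :: rest =>
    let xs := first :: rest
    let n : Int := xs.length
    -- gaps = [(xs[i-1], xs[i]) for i in range(1, n) if xs[i] != 0 and xs[i] != xs[i-1] + 1]
    let gaps := (PySem.List.pyRange 1 n 1).filterMap (fun i =>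
        let a := PySem.List.pyGetD xs (i - 1) 0
        let b := PySem.List.pyGetD xs i 0
        if b ≠ 0 ∧ b ≠ a + 1 then some (a, b) else none)
    let start0 := if first ≠ 0 then first else 0
    let starts := start0 :: gaps.map (·.2)
    let last := xs.getLastD 0        -- xs[-1]; exact, xs is nonempty here
    let ends := gaps.map (·.1) ++ [last]
    let ansT := starts.zip ends
    let ctxT := (if first ≠ 0 then [(0, first)] else []) ++ gaps ++
        (if last < ctxlen - 1 then [(last, ctxlen)] else [])
    (ctxT, ansT)

-- ===== PRECONDITION & SPEC =====
def Spec_getTuples (answerIndicesList : List Int) (ctxlen : Int) (out : (List (Int × Int)) × (List (Int × Int))) : Prop := out = getTuples_alt answerIndicesList ctxlen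
instance (answerIndicesList : List Int) (ctxlen : Int) (out : (List (Int × Int)) × (List (Int × Int))) : Decidable (Spec_getTuples answerIndicesList ctxlen out) := by unfold Spec_getTuples; infer_instance

-- ===== CLAIM (what is proved, stated in full; the proofs are below) =====
def Claim_equal_getTuples : Prop := ∀ (answerIndicesList : List Int) (ctxlen : Int), Dom_getTuples answerIndicesList ctxlen → Spec_getTuples answerIndicesList ctxlen (getTuples answerIndicesList ctxlen)

-- ===== LEMMAS AND PROOFS =====

-- Common recursive characterisation of the run structure, used only by the proofs:
-- gtCore s p xs = (gap pairs, answer tuples produced inside the loop, final start).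
def gtCore (s p : Int) : List Int → (List (Int × Int)) × (List (Int × Int)) × Int
  | [] => ([], [], s)
  | x :: xs =>
    if x ≠ 0 ∧ x ≠ p + 1 then
      let r := gtCore x x xs
      ((p, x) :: r.1, (s, p) :: r.2.1, r.2.2)
    else gtCore s x xs

-- A's loop, started after the first element, computes gtCore.
lemma getTuplesA_loop (xs : List Int) : ∀ (ctx ans : List (Int × Int)) (s p : Int),
    xs.foldl getTuplesStepA (ctx, ans, false, s, some p)
      = (ctx ++ (gtCore s p xs).1, ans ++ (gtCore s p xs).2.1, false,
         (gtCore s p xs).2.2, some (xs.getLastD p)) := by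
  induction xs with
  | nil => intro ctx ans s p; simp [gtCore]
  | cons x xs ih =>
    intro ctx ans s p
    simp only [List.foldl_cons]
    by_cases hx0 : x = 0
    · subst hx0
      have hc : ¬ ((0:Int) ≠ 0 ∧ (0:Int) ≠ p + 1) := by simp
      simp only [getTuplesStepA, if_true, Bool.false_eq_true, if_false]
      rw [ih, List.getLastD_cons]
      simp only [gtCore, if_neg hc]
    · by_cases hcons : x = p + 1
      · have hc : ¬ (x ≠ 0 ∧ x ≠ p + 1) := by simp [hcons]
        simp only [getTuplesStepA, if_neg hx0, Bool.false_eq_true, if_false, if_pos hcons]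
        rw [ih, List.getLastD_cons]
        simp only [gtCore, if_neg hc]
      · have hc : (x ≠ 0 ∧ x ≠ p + 1) := ⟨hx0, hcons⟩
        simp only [getTuplesStepA, if_neg hx0, Bool.false_eq_true, if_false, if_neg hcons]
        rw [ih, List.getLastD_cons]
        simp only [gtCore, if_pos hc, List.append_assoc, List.singleton_append]

-- B's index comprehension over range(1, n) is the adjacent-pairs zip of the list.
lemma gaps_map_eq_zip (first : Int) (rest : List Int) :
    (PySem.List.pyRange 1 ((first :: rest).length : Int) 1).map
        (fun i => (PySem.List.pyGetD (first :: rest) (i - 1) 0,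
                   PySem.List.pyGetD (first :: rest) i 0))
      = (first :: rest).zip rest := by
  apply List.ext_getElem
  · simp [PySem.List.length_pyRange_one]
  · intro k h1 h2
    have hk : k < rest.length := by
      simpa [PySem.List.length_pyRange_one] using h1
    simp only [List.getElem_map, PySem.List.getElem_pyRange_one, List.getElem_zip]
    have ha : (1 : Int) + k - 1 = (k : Int) := by ring
    have hb : (1 : Int) + k = ((k + 1 : Nat) : Int) := by push_cast; ring
    rw [ha, hb,
      PySem.List.pyGetD_eq_getElem (first :: rest) 0 (by omega) (by simp; omega),
      PySem.List.pyGetD_eq_getElem (first :: rest) 0 (by omega) (by simp; omega)]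
    simp

-- The filtered zip is gtCore's gap list (independent of the start accumulator s).
lemma zip_filter_eq_core (xs : List Int) : ∀ (s p : Int),
    ((p :: xs).zip xs).filter (fun pr => decide (pr.2 ≠ 0 ∧ pr.2 ≠ pr.1 + 1))
      = (gtCore s p xs).1 := by
  induction xs with
  | nil => intro s p; simp [gtCore]
  | cons x xs ih =>
    intro s p
    by_cases hc : (x ≠ 0 ∧ x ≠ p + 1)
    · simp only [List.zip_cons_cons, List.filter_cons, gtCore, if_pos hc, decide_eq_true_eq]
      rw [ih x x]
    · simp only [List.zip_cons_cons, List.filter_cons, gtCore, if_neg hc, decide_eq_true_eq]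
      exact ih s x

-- Zipping run starts with run ends reproduces the loop's answer tuples plus the final one.
lemma zip_starts_ends (xs : List Int) : ∀ (s p : Int),
    (s :: ((gtCore s p xs).1.map (·.2))).zip ((gtCore s p xs).1.map (·.1) ++ [xs.getLastD p])
      = (gtCore s p xs).2.1 ++ [((gtCore s p xs).2.2, xs.getLastD p)] := by
  induction xs with
  | nil => intro s p; simp [gtCore]
  | cons x xs ih =>
    intro s p
    by_cases hc : (x ≠ 0 ∧ x ≠ p + 1)
    · simp only [gtCore, if_pos hc, List.map_cons, List.cons_append, List.zip_cons_cons,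
        List.getLastD_cons]
      rw [ih x x]
    · simp only [gtCore, if_neg hc, List.getLastD_cons]
      exact ih s x

-- B's gap comprehension equals gtCore's gap list.
lemma gaps_eq_core (first : Int) (rest : List Int) (s : Int) :
    ((PySem.List.pyRange 1 ((first :: rest).length : Int) 1).filterMap (fun i =>
        let a := PySem.List.pyGetD (first :: rest) (i - 1) 0
        let b := PySem.List.pyGetD (first :: rest) i 0
        if b ≠ 0 ∧ b ≠ a + 1 then some (a, b) else none))
      = (gtCore s first rest).1 := by
  have hstep : (fun i =>
        let a := PySem.List.pyGetD (first :: rest) (i - 1) 0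
        let b := PySem.List.pyGetD (first :: rest) i 0
        if b ≠ 0 ∧ b ≠ a + 1 then some (a, b) else none)
      = (fun pr : Int × Int => if pr.2 ≠ 0 ∧ pr.2 ≠ pr.1 + 1 then some pr else none) ∘
        (fun i => (PySem.List.pyGetD (first :: rest) (i - 1) 0,
                   PySem.List.pyGetD (first :: rest) i 0)) := by
    funext i; rfl
  have hg : (fun pr : Int × Int => if pr.2 ≠ 0 ∧ pr.2 ≠ pr.1 + 1 then some pr else none)
      = Option.guard (fun pr : Int × Int => decide (pr.2 ≠ 0 ∧ pr.2 ≠ pr.1 + 1)) := by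
    funext pr; simp [Option.guard]
  rw [hstep, ← List.filterMap_map, gaps_map_eq_zip, hg, List.filterMap_eq_filter,
    zip_filter_eq_core rest s first]

-- ===== VERDICT (by name: the statement is the Claim_ definition above) =====
theorem getTuples_spec : Claim_equal_getTuples := by
  intro xs ctxlen _
  unfold Spec_getTuples
  match xs with
  | [] => rfl
  | first :: rest =>
    by_cases hf : first = 0
    · subst hf
      show getTuples (0 :: rest) ctxlen = _
      unfold getTuples getTuples_alt
      simp only [List.foldl_cons, getTuplesStepA, if_true]
      rw [getTuplesA_loop, gaps_eq_core 0 rest 0, List.getLastD_cons]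
      simp only [List.nil_append, ne_eq, not_true_eq_false, if_false, ite_self]
      rw [zip_starts_ends rest 0 0]
      split_ifs <;> simp
    · unfold getTuples getTuples_alt
      simp only [List.foldl_cons, getTuplesStepA, if_neg hf, if_true]
      rw [getTuplesA_loop, gaps_eq_core first rest first, List.getLastD_cons]
      simp only [List.nil_append, ne_eq, hf, not_false_eq_true, if_true]
      rw [zip_starts_ends rest first first]
      split_ifs <;> simp
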